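-- pv_equiv track=rewrite | github.com/IbrahimKhanMd/litcoder | .vscode/Contests/pre_contest_2.py | bit_matching_count
-- ===== SOURCE A (Python) =====
-- def bit_matching_count(A):
--     max_bits = 3  # Since the problem restricts to 3-bit binary numbers (from 000 to 111)
--     N = len(A)
--     total_sum = 0
--
--     # Iterate over all bit positions (0, 1, 2 for 3-bit numbers)
--     for bit in range(max_bits):
--         count_1 = 0
--         count_0 = 0
--
--         # Count how many numbers have a 1 or 0 at the current bit position
--         for num in A:
--             if num & (1 << bit):  # Check if the 'bit' position is set to 1
--                 count_1 += 1
--             else: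
--                 count_0 += 1
--
--         # The number of matching bits for the current bit position
--         total_sum += count_1 * count_1 + count_0 * count_0
--
--     return total_sum
-- ===== SOURCE B (Python) =====
-- def bit_matching_count(A):
--     # One pass to build a histogram of the low three bits, then a fixed
--     # 8-entry table scan per bit position instead of re-scanning A.
--     hist = [0] * 8
--     for num in A:
--         hist[num & 7] += 1
--     N = len(A)
--     total = 0
--     for bit in range(3):
--         mask = 1 << bit
--         count_1 = sum(hist[p] for p in range(8) if p & mask)
--         count_0 = N - count_1
--         total += count_1 * count_1 + count_0 * count_0
--     return total
-- ===== Notes on version B (the rewrite author's own statement) =====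
-- stated objective: faster
-- what changed: B replaces A's per-bit rescan of the input (3 passes counting set bits) with a single pass building an 8-bucket histogram of num & 7, then sums the fixed 8-entry table per bit.
import Mathlib
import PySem

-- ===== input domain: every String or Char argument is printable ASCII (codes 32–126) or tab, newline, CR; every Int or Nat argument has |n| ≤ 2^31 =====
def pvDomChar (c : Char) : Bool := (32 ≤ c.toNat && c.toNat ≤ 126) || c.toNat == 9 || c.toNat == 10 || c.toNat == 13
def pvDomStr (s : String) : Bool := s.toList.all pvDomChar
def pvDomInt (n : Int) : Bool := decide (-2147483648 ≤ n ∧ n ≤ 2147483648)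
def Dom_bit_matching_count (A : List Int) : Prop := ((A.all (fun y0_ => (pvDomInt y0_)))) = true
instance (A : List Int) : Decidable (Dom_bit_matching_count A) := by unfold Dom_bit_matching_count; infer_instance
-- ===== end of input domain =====

-- B replaces A's three rescans of the input with one histogram pass over num & 7
-- plus a fixed 8-entry table scan per bit (objective: faster, constant-factor).

-- ===== PORT A =====
-- Port of A: for each bit in range(3), rescan A counting set/clear bits.
-- 'bit.toNat' is exact: bit ranges over pyRange 0 3 1, so 0 ≤ bit.
def bit_matching_count (A : List Int) : Int :=
  let max_bits : Int := 3
  let _N : Int := A.length  -- Python assigns N = len(A) but never uses it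
  (PySem.List.pyRange 0 max_bits 1).foldl (fun total_sum bit =>
    let c := A.foldl (fun (c : Int × Int) num =>
        if PySem.Int.band num ((1 : Int) <<< bit.toNat) ≠ 0 then (c.1 + 1, c.2)
        else (c.1, c.2 + 1)) (0, 0)
    total_sum + (c.1 * c.1 + c.2 * c.2)) 0

-- ===== PORT B =====
-- Port of B: one pass builds hist of num & 7 (index nonneg, so .toNat is exact),
-- then a scan over the fixed 8-entry pattern table per bit.
def bit_matching_count_alt (A : List Int) : Int :=
  let hist : List Int := A.foldl (fun h num =>
      let i := (PySem.Int.band num 7).toNat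
      h.set i (h.getD i 0 + 1)) (List.replicate 8 0)
  let N : Int := A.length
  (PySem.List.pyRange 0 3 1).foldl (fun total bit =>
    let mask : Int := (1 : Int) <<< bit.toNat
    let count_1 := ((PySem.List.pyRange 0 8 1).filter
        (fun p => PySem.Int.band p mask ≠ 0)).foldl (fun s p => s + hist.getD p.toNat 0) 0
    let count_0 := N - count_1
    total + (count_1 * count_1 + count_0 * count_0)) 0

-- ===== PRECONDITION & SPEC =====
def Spec_bit_matching_count (A : List Int) (out : Int) : Prop := out = bit_matching_count_alt A
instance (A : List Int) (out : Int) : Decidable (Spec_bit_matching_count A out) := by unfold Spec_bit_matching_count; infer_instance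

-- ===== CLAIM (what is proved, stated in full; the proofs are below) =====
def Claim_equal_bit_matching_count : Prop := ∀ (A : List Int), Dom_bit_matching_count A → Spec_bit_matching_count A (bit_matching_count A)

-- ===== LEMMAS AND PROOFS =====
-- bit predicate and counters used to characterise both folds
def pvHasBit (m n : Int) : Bool := PySem.Int.band n m != 0
def pvC (m : Int) (A : List Int) : Nat := A.countP (pvHasBit m)
def pvC0 (m : Int) (A : List Int) : Nat := A.countP (fun n => !pvHasBit m n)

theorem pv_nat_and7 (k : Nat) : k &&& 7 = k % 8 := by
  have := Nat.and_two_pow_sub_one_eq_mod k 3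
  norm_num at this; omega

theorem pv_nat_and_mod (k m : Nat) (hm : m < 8) : m &&& k = m &&& (k % 8) := by
  apply Nat.eq_of_testBit_eq
  intro i
  show (m &&& k).testBit i = _
  rw [Nat.testBit_and, Nat.testBit_and]
  rcases lt_or_ge i 3 with h | h
  · have hk : (k % 8).testBit i = k.testBit i := by
      have := Nat.testBit_mod_two_pow k 3 i
      norm_num at this; rw [this]; simp [h]
    rw [hk]
  · have hm0 : m.testBit i = false := Nat.testBit_eq_false_of_lt (lt_of_lt_of_le hm (by
      calc (8:Nat) = 2 ^ 3 := rfl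
        _ ≤ 2 ^ i := Nat.pow_le_pow_right (by norm_num) h))
    simp [hm0]

theorem pv_nat_sub_and (k m : Nat) (hm : m < 8) :
    m - (m &&& k) = (7 - (7 &&& k)) &&& m := by
  rw [pv_nat_and_mod k m hm, pv_nat_and_mod k 7 (by norm_num), Nat.and_comm _ m]
  have h8 : k % 8 < 8 := Nat.mod_lt _ (by norm_num)
  set r := k % 8 with hr
  interval_cases r <;> interval_cases m <;> decide

-- 0 ≤ num & 7 < 8
theorem pv_band7_lt (n : Int) : 0 ≤ PySem.Int.band n 7 ∧ PySem.Int.band n 7 < 8 := by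
  by_cases h : 0 ≤ n
  · simp only [PySem.Int.band, if_pos h, if_pos (by norm_num : (0:Int) ≤ 7)]
    constructor
    · exact Int.natCast_nonneg _
    · have : n.toNat &&& 7 < 8 := by rw [pv_nat_and7]; exact Nat.mod_lt _ (by norm_num)
      exact_mod_cast this
  · simp only [PySem.Int.band, if_neg h, if_pos (by norm_num : (0:Int) ≤ 7)]
    constructor
    · exact Int.natCast_nonneg _
    · have : (7:Int).toNat - ((7:Int).toNat &&& (-n - 1).toNat) < 8 := by omega
      exact_mod_cast this

-- num & mask = (num & 7) & mask for 0 ≤ mask < 8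
theorem pv_band_band7 (n m : Int) (h0 : 0 ≤ m) (h8 : m < 8) :
    PySem.Int.band n m = PySem.Int.band (PySem.Int.band n 7) m := by
  have hm8 : m.toNat < 8 := by omega
  by_cases h : 0 ≤ n
  · rw [show PySem.Int.band n 7 = ((n.toNat &&& 7 : Nat) : Int) by
      simp only [PySem.Int.band, if_pos h, if_pos (by norm_num : (0:Int) ≤ 7)]; rfl]
    rw [PySem.Int.band_of_nonneg h h0, PySem.Int.band_of_nonneg (Int.natCast_nonneg _) h0]
    rw [Int.toNat_natCast]
    rw [pv_nat_and7, Nat.and_comm (n.toNat % 8), ← pv_nat_and_mod _ _ hm8, Nat.and_comm]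
  · rw [show PySem.Int.band n 7 = (((7 : Nat) - (7 &&& (-n - 1).toNat) : Nat) : Int) by
      simp only [PySem.Int.band, if_neg h, if_pos (by norm_num : (0:Int) ≤ 7)]; rfl]
    rw [show PySem.Int.band n m = ((m.toNat - (m.toNat &&& (-n - 1).toNat) : Nat) : Int) by
      simp only [PySem.Int.band, if_neg h, if_pos h0]]
    rw [PySem.Int.band_of_nonneg (Int.natCast_nonneg _) h0, Int.toNat_natCast]
    rw [pv_nat_sub_and _ _ hm8]

-- the sum B takes over the fixed pattern table, as a named function
def pvS (m : Int) (h : List Int) : Int :=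
  ((PySem.List.pyRange 0 8 1).filter (fun p => PySem.Int.band p m ≠ 0)).foldl
    (fun s p => s + h.getD p.toNat 0) 0

-- A's inner loop computes the two bit counters
theorem pv_foldA (m : Int) (A : List Int) (a b : Int) :
    A.foldl (fun (c : Int × Int) num =>
        if PySem.Int.band num m ≠ 0 then (c.1 + 1, c.2) else (c.1, c.2 + 1)) (a, b)
      = (a + (pvC m A : Int), b + (pvC0 m A : Int)) := by
  induction A generalizing a b with
  | nil => simp [pvC, pvC0]
  | cons x t ih =>
    simp only [List.foldl_cons]
    by_cases hx : PySem.Int.band x m ≠ 0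
    · rw [if_pos hx, ih]
      have : pvHasBit m x = true := by simp [pvHasBit, bne_iff_ne, hx]
      refine Prod.ext ?_ ?_ <;> simp [pvC, pvC0, List.countP_cons, this] <;> push_cast <;> ring
    · rw [if_neg hx, ih]
      have : pvHasBit m x = false := by simp [pvHasBit, bne_iff_ne]; simpa using hx
      refine Prod.ext ?_ ?_ <;> simp [pvC, pvC0, List.countP_cons, this] <;> push_cast <;> ring

-- one histogram update shifts the pattern-table sum by the bit test
theorem pv_step (m : Int) (hm : m = 1 ∨ m = 2 ∨ m = 4) (h : List Int) (hl : h.length = 8)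
    (num : Int) :
    pvS m (h.set (PySem.Int.band num 7).toNat
        (h.getD (PySem.Int.band num 7).toNat 0 + 1))
      = pvS m h + (if pvHasBit m num then 1 else 0) := by
  obtain ⟨h0, h8⟩ := pv_band7_lt num
  have hcast : ((PySem.Int.band num 7).toNat : Int) = PySem.Int.band num 7 :=
    Int.toNat_of_nonneg h0
  have hb : pvHasBit m num =
      decide (PySem.Int.band ((PySem.Int.band num 7).toNat : Int) m ≠ 0) := by
    rw [hcast, ← pv_band_band7 num m (by rcases hm with rfl|rfl|rfl <;> norm_num)
      (by rcases hm with rfl|rfl|rfl <;> norm_num)]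
    by_cases hz : PySem.Int.band num m = 0 <;> simp [pvHasBit, hz]
  set i := (PySem.Int.band num 7).toNat with hidef
  have hi8 : i < 8 := by omega
  clear_value i
  clear hidef hcast h0 h8
  rcases hm with rfl | rfl | rfl
  · have hf : ((PySem.List.pyRange 0 8 1).filter (fun p => decide (PySem.Int.band p 1 ≠ 0)))
        = [1, 3, 5, 7] := by decide
    simp only [pvS, hf, List.foldl]
    interval_cases i <;> rw [hb] <;>
      simp [List.getD_eq_getElem?_getD, List.getElem?_set, hl, PySem.Int.band] <;> ring
  · have hf : ((PySem.List.pyRange 0 8 1).filter (fun p => decide (PySem.Int.band p 2 ≠ 0)))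
        = [2, 3, 6, 7] := by decide
    simp only [pvS, hf, List.foldl]
    interval_cases i <;> rw [hb] <;>
      simp [List.getD_eq_getElem?_getD, List.getElem?_set, hl, PySem.Int.band] <;> ring
  · have hf : ((PySem.List.pyRange 0 8 1).filter (fun p => decide (PySem.Int.band p 4 ≠ 0)))
        = [4, 5, 6, 7] := by decide
    simp only [pvS, hf, List.foldl]
    interval_cases i <;> rw [hb] <;>
      simp [List.getD_eq_getElem?_getD, List.getElem?_set, hl, PySem.Int.band] <;> ring

theorem pv_zero (l : List Int) (a : Int) :
    l.foldl (fun s p => s + (List.replicate 8 (0:Int)).getD p.toNat 0) a = a := by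
  induction l generalizing a with
  | nil => rfl
  | cons x t ih =>
    have h0 : (List.replicate 8 (0:Int)).getD x.toNat 0 = 0 := by
      rw [List.getD_eq_getElem?_getD, List.getElem?_replicate]
      split <;> rfl
    rw [List.foldl_cons, h0, add_zero, ih]

-- the whole histogram pass: pattern-table sum = count of elements with the bit set
theorem pv_foldB (m : Int) (hm : m = 1 ∨ m = 2 ∨ m = 4) (A : List Int) (h : List Int)
    (hl : h.length = 8) :
    pvS m (A.foldl (fun h num =>
        h.set (PySem.Int.band num 7).toNat (h.getD (PySem.Int.band num 7).toNat 0 + 1)) h)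
      = pvS m h + (pvC m A : Int) := by
  induction A generalizing h with
  | nil => simp [pvC]
  | cons x t ih =>
    simp only [List.foldl_cons]
    rw [ih _ (by simp [hl]), pv_step m hm h hl x]
    by_cases hx : pvHasBit m x <;> simp [pvC, List.countP_cons, hx] <;> push_cast <;> ring

theorem pv_hist (m : Int) (hm : m = 1 ∨ m = 2 ∨ m = 4) (A : List Int) :
    ((PySem.List.pyRange 0 8 1).filter (fun p => PySem.Int.band p m ≠ 0)).foldl
      (fun s p => s + (A.foldl (fun h num =>
          h.set (PySem.Int.band num 7).toNat (h.getD (PySem.Int.band num 7).toNat 0 + 1))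
        (List.replicate 8 0)).getD p.toNat 0) 0
      = (pvC m A : Int) := by
  have hz : pvS m (List.replicate 8 0) = 0 := pv_zero _ _
  have := pv_foldB m hm A (List.replicate 8 0) (by simp)
  rw [hz, zero_add] at this
  simpa [pvS] using this

theorem pv_count_split (m : Int) (A : List Int) :
    (pvC0 m A : Int) = (A.length : Int) - (pvC m A : Int) := by
  have h1 : pvC0 m A = List.countP (fun a => decide (¬ pvHasBit m a = true)) A := by
    unfold pvC0; congr 1; funext n; cases pvHasBit m n <;> rfl
  have h2 : A.length = pvC m A + List.countP (fun a => decide (¬ pvHasBit m a = true)) A :=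
    List.length_eq_countP_add_countP _
  omega

theorem pv_main (A : List Int) : bit_matching_count A = bit_matching_count_alt A := by
  have hr3 : PySem.List.pyRange 0 3 1 = [0, 1, 2] := by decide
  simp only [bit_matching_count, bit_matching_count_alt, hr3, List.foldl_cons, List.foldl_nil]
  rw [show ((1:Int) <<< ((Int.toNat (0:Int) : Nat) : Int)) = 1 from by decide,
      show ((1:Int) <<< ((Int.toNat (1:Int) : Nat) : Int)) = 2 from by decide,
      show ((1:Int) <<< ((Int.toNat (2:Int) : Nat) : Int)) = 4 from by decide]
  rw [pv_foldA 1 A 0 0, pv_foldA 2 A 0 0, pv_foldA 4 A 0 0,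
      pv_hist 1 (by tauto) A, pv_hist 2 (by tauto) A, pv_hist 4 (by tauto) A]
  rw [pv_count_split 1 A, pv_count_split 2 A, pv_count_split 4 A]
  ring

-- ===== VERDICT (by name: the statement is the Claim_ definition above) =====
theorem bit_matching_count_spec : Claim_equal_bit_matching_count := by
  intro A _
  exact pv_main A
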